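-- pv_equiv track=rewrite | github.com/alexmarculescu/jarvis | app.py | source_priority
-- ===== SOURCE A (Python) =====
-- def source_priority(source: str) -> int:
--     s = source.lower()
--
--     high_priority_markers = [
--         "specific setup and support staff manuals",
--         "cics - ",
--         "quick start for support staff",
--         "onboarding workflow new employee",
--         "student manuals",
--         "teaching staff manuals",
--         "template logic cics",
--         "prepare for semester in cics",
--         "important cics queries",
--         "academic_calendar_workflow",
--     ]
--     if any(marker in s for marker in high_priority_markers):
--         return 0
--
--     mid_priority_markers = [
--         "onedrive_1_4-7-2026",
--         ".docx",
--         ".xlsx",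
--         ".xls",
--         ".txt",
--         ".csv",
--     ]
--     if any(marker in s for marker in mid_priority_markers):
--         return 1
--
--     low_priority_markers = [
--         "peoplesoft pdf manuals",
--         "ctclink reference center",
--         "pscs92",
--         "oracle",
--         "campus community",
--         "student records",
--         "academic structure",
--         "admissions",
--         "self service",
--         "gradebook",
--     ]
--     if any(marker in s for marker in low_priority_markers):
--         return 2
--
--     return 3
-- ===== SOURCE B (Python) =====
-- # Text-driven scan: instead of asking "marker in s" per tier, walk the lowered
-- # source position by position and check which markers start at each offset,
-- # keeping the best (smallest) priority seen.
-- _MARKERS = [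
--     ("specific setup and support staff manuals", 0),
--     ("cics - ", 0),
--     ("quick start for support staff", 0),
--     ("onboarding workflow new employee", 0),
--     ("student manuals", 0),
--     ("teaching staff manuals", 0),
--     ("template logic cics", 0),
--     ("prepare for semester in cics", 0),
--     ("important cics queries", 0),
--     ("academic_calendar_workflow", 0),
--     ("onedrive_1_4-7-2026", 1),
--     (".docx", 1),
--     (".xlsx", 1),
--     (".xls", 1),
--     (".txt", 1),
--     (".csv", 1),
--     ("peoplesoft pdf manuals", 2),
--     ("ctclink reference center", 2),
--     ("pscs92", 2),
--     ("oracle", 2),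
--     ("campus community", 2),
--     ("student records", 2),
--     ("academic structure", 2),
--     ("admissions", 2),
--     ("self service", 2),
--     ("gradebook", 2),
-- ]
--
--
-- def source_priority(source: str) -> int:
--     s = source.lower()
--     best = 3
--     for i in range(len(s)):
--         for m, p in _MARKERS:
--             if p < best and s.startswith(m, i):
--                 best = p
--     return best
-- ===== Notes on version B (the rewrite author's own statement) =====
-- stated objective: alternative
-- what changed: Replaces A's marker-driven tiered substring-membership checks with early returns by a text-driven scan: one pass over the positions of the lowered source testing which markers start at each offset (a naive multi-pattern matcher), keeping the least priority seen.
import Mathlib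
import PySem

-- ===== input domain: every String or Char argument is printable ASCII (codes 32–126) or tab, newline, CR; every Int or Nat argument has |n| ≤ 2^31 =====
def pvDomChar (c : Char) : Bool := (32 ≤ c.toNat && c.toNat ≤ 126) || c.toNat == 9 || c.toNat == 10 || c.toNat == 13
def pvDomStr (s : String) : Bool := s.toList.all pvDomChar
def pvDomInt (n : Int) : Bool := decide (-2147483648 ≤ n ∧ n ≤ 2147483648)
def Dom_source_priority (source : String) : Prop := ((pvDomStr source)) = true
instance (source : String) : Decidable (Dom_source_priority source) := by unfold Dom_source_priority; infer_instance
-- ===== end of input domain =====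

-- B replaces A's marker-driven tiered `in`-checks by a text-driven scan: walk the
-- lowered source position by position, test which markers start at each offset,
-- and keep the least priority seen (alternative decomposition, same cost class).

-- ===== PORT A =====
def highMarkers : List String :=
  [ "specific setup and support staff manuals", "cics - ",
    "quick start for support staff", "onboarding workflow new employee",
    "student manuals", "teaching staff manuals", "template logic cics",
    "prepare for semester in cics", "important cics queries",
    "academic_calendar_workflow" ]

def midMarkers : List String :=
  [ "onedrive_1_4-7-2026", ".docx", ".xlsx", ".xls", ".txt", ".csv" ]

def lowMarkers : List String :=
  [ "peoplesoft pdf manuals", "ctclink reference center", "pscs92", "oracle",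
    "campus community", "student records", "academic structure", "admissions",
    "self service", "gradebook" ]

def source_priority (source : String) : Int :=
  let s := PySem.Str.lower source
  if highMarkers.any (fun m => PySem.Str.isIn m s) then 0
  else if midMarkers.any (fun m => PySem.Str.isIn m s) then 1
  else if lowMarkers.any (fun m => PySem.Str.isIn m s) then 2
  else 3

-- ===== PORT B =====
-- Source B's flat _MARKERS table, verbatim.
def spMarkers : List (String × Int) :=
  [ ("specific setup and support staff manuals", 0), ("cics - ", 0),
    ("quick start for support staff", 0), ("onboarding workflow new employee", 0),
    ("student manuals", 0), ("teaching staff manuals", 0),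
    ("template logic cics", 0), ("prepare for semester in cics", 0),
    ("important cics queries", 0), ("academic_calendar_workflow", 0),
    ("onedrive_1_4-7-2026", 1), (".docx", 1), (".xlsx", 1), (".xls", 1),
    (".txt", 1), (".csv", 1),
    ("peoplesoft pdf manuals", 2), ("ctclink reference center", 2),
    ("pscs92", 2), ("oracle", 2), ("campus community", 2),
    ("student records", 2), ("academic structure", 2), ("admissions", 2),
    ("self service", 2), ("gradebook", 2) ]

-- s.startswith(m, i): exact for the natural offsets 0 ≤ i used here (Python's
-- startswith with a non-negative start is 'm is a prefix of s[i:]').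
def spStartsAt (sl : List Char) (i : Nat) (m : String) : Bool :=
  m.toList.isPrefixOf (sl.drop i)

-- the inner 'for m, p in _MARKERS' loop body, acc = best
def spInner (sl : List Char) (best : Int) (i : Nat) : Int :=
  spMarkers.foldl
    (fun best mp => if mp.2 < best ∧ spStartsAt sl i mp.1 then mp.2 else best) best

def source_priority_alt (source : String) : Int :=
  let sl := (PySem.Str.lower source).toList
  -- for i in range(len(s)); len(s) is a natural number, so range is List.range
  (List.range sl.length).foldl (spInner sl) 3

-- ===== PRECONDITION & SPEC =====
def Spec_source_priority (source : String) (out : Int) : Prop := out = source_priority_alt source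
instance (source : String) (out : Int) : Decidable (Spec_source_priority source out) := by unfold Spec_source_priority; infer_instance

-- ===== CLAIM (what is proved, stated in full; the proofs are below) =====
def Claim_equal_source_priority : Prop := ∀ (source : String), Dom_source_priority source → Spec_source_priority source (source_priority source)

-- ===== LEMMAS AND PROOFS =====

-- the flat table is the three tiers in order
theorem spMarkers_eq :
    spMarkers = highMarkers.map (fun m => (m, (0 : Int)))
      ++ midMarkers.map (fun m => (m, (1 : Int)))
      ++ lowMarkers.map (fun m => (m, (2 : Int))) := by
  rfl

-- folding one constant-priority block of Source B's inner loop
theorem spBlock (c : String → Bool) (k : Int) (ms : List String) (a : Int) :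
    List.foldl (fun best mp => if mp.2 < best ∧ c mp.1 then mp.2 else best) a
      (ms.map (fun m => (m, k)))
    = if ms.any c then min a k else a := by
  induction ms generalizing a with
  | nil => simp
  | cons m ms ih =>
    simp only [List.map_cons, List.foldl_cons, List.any_cons]
    rw [ih]
    rcases Bool.eq_false_or_eq_true (c m) with h | h <;>
      rcases Bool.eq_false_or_eq_true (ms.any c) with hm | hm <;>
      simp [h, hm, Int.min_def] <;> split_ifs <;> omega

-- first-matching-tier priority at one text offset
def spPrioAt (sl : List Char) (i : Nat) : Int :=
  if highMarkers.any (spStartsAt sl i) then 0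
  else if midMarkers.any (spStartsAt sl i) then 1
  else if lowMarkers.any (spStartsAt sl i) then 2
  else 3

theorem spInner_eq (sl : List Char) (a : Int) (i : Nat) (ha : a ≤ 3) :
    spInner sl a i = min a (spPrioAt sl i) := by
  unfold spInner spPrioAt
  rw [spMarkers_eq]
  simp only [List.foldl_append, spBlock]
  rcases Bool.eq_false_or_eq_true (highMarkers.any (spStartsAt sl i)) with h1 | h1 <;>
    rcases Bool.eq_false_or_eq_true (midMarkers.any (spStartsAt sl i)) with h2 | h2 <;>
    rcases Bool.eq_false_or_eq_true (lowMarkers.any (spStartsAt sl i)) with h3 | h3 <;>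
    simp [h1, h2, h3, Int.min_def] <;> first | (split_ifs <;> omega) | omega

-- tiered value of a whole set of offsets
def spQ (sl : List Char) (L : List Nat) : Int :=
  if L.any (fun i => highMarkers.any (spStartsAt sl i)) then 0
  else if L.any (fun i => midMarkers.any (spStartsAt sl i)) then 1
  else if L.any (fun i => lowMarkers.any (spStartsAt sl i)) then 2
  else 3

theorem spQ_le (sl : List Char) (L : List Nat) : spQ sl L ≤ 3 := by
  unfold spQ; split_ifs <;> omega

theorem spQ_cons (sl : List Char) (x : Nat) (L : List Nat) :
    spQ sl (x :: L) = min (spPrioAt sl x) (spQ sl L) := by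
  unfold spQ spPrioAt
  simp only [List.any_cons]
  rcases Bool.eq_false_or_eq_true (highMarkers.any (spStartsAt sl x)) with h1 | h1 <;>
    rcases Bool.eq_false_or_eq_true (midMarkers.any (spStartsAt sl x)) with h2 | h2 <;>
    rcases Bool.eq_false_or_eq_true (lowMarkers.any (spStartsAt sl x)) with h3 | h3 <;>
    rcases Bool.eq_false_or_eq_true (L.any (fun i => highMarkers.any (spStartsAt sl i))) with g1 | g1 <;>
    rcases Bool.eq_false_or_eq_true (L.any (fun i => midMarkers.any (spStartsAt sl i))) with g2 | g2 <;>
    rcases Bool.eq_false_or_eq_true (L.any (fun i => lowMarkers.any (spStartsAt sl i))) with g3 | g3 <;>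
    simp [h1, h2, h3, g1, g2, g3]

theorem spPrioAt_le (sl : List Char) (i : Nat) : spPrioAt sl i ≤ 3 := by
  unfold spPrioAt; split_ifs <;> omega

theorem spFold_eq (sl : List Char) (L : List Nat) (a : Int) (ha : a ≤ 3) :
    L.foldl (spInner sl) a = min a (spQ sl L) := by
  induction L generalizing a with
  | nil =>
    unfold spQ
    simp [Int.min_def]
    omega
  | cons x L ih =>
    simp only [List.foldl_cons]
    rw [spInner_eq sl a x ha, spQ_cons,
        ih _ (le_trans (min_le_right _ _) (spPrioAt_le sl x)), min_assoc]

theorem spFold3 (sl : List Char) (L : List Nat) :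
    L.foldl (spInner sl) 3 = spQ sl L := by
  rw [spFold_eq sl L 3 (by omega)]
  have := spQ_le sl L
  omega

-- a nonempty pattern is an infix iff it starts at some position strictly inside
theorem infix_iff_startsAt (m : String) (hm : m.toList ≠ []) (sl : List Char) :
    (m.toList <:+: sl) ↔ ∃ i, i < sl.length ∧ spStartsAt sl i m = true := by
  constructor
  · rintro ⟨u, v, rfl⟩
    have hlen : 0 < m.toList.length := List.length_pos_of_ne_nil hm
    refine ⟨u.length, ?_, ?_⟩
    · simp only [List.length_append]; omega
    · rw [spStartsAt, List.isPrefixOf_iff_prefix, List.append_assoc, List.drop_left]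
      exact List.prefix_append _ _
  · rintro ⟨i, hi, hpre⟩
    rw [spStartsAt, List.isPrefixOf_iff_prefix] at hpre
    rcases hpre with ⟨t, ht⟩
    exact ⟨sl.take i, t, by rw [List.append_assoc, ht, List.take_append_drop]⟩

-- A's per-tier 'marker in s' check equals B's 'some offset starts with a marker'
theorem any_isIn_eq (ms : List String) (h : ∀ m ∈ ms, m.toList ≠ []) (s : String) :
    ms.any (fun m => PySem.Str.isIn m s)
      = (List.range s.toList.length).any (fun i => ms.any (spStartsAt s.toList i)) := by
  rcases Bool.eq_false_or_eq_true (ms.any (fun m => PySem.Str.isIn m s)) with hb | hb <;> rw [hb]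
  case inr =>
    symm
    rw [List.any_eq_false]
    intro i _
    simp only [Bool.not_eq_true]
    rw [List.any_eq_false]
    intro m hm
    simp only [Bool.not_eq_true]
    rw [List.any_eq_false] at hb
    have hf := hb m hm
    simp only [Bool.not_eq_true] at hf ⊢
    rcases Bool.eq_false_or_eq_true (spStartsAt s.toList i m) with hs | hs
    · exfalso
      have hin : PySem.Str.isIn m s = true := by
        rw [PySem.Str.isIn_iff_infix, infix_iff_startsAt m (h m hm) s.toList]
        refine ⟨i, ?_, hs⟩
        by_contra hlt
        rw [Nat.not_lt] at hlt
        rw [spStartsAt, List.drop_eq_nil_of_le hlt] at hs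
        rw [List.isPrefixOf_iff_prefix, List.prefix_nil] at hs
        exact (h m hm) hs
      rw [hin] at hf
      exact Bool.noConfusion hf
    · exact hs
  case inl =>
    symm
    rw [List.any_eq_true] at hb ⊢
    rcases hb with ⟨m, hm, hin⟩
    rw [PySem.Str.isIn_iff_infix, infix_iff_startsAt m (h m hm) s.toList] at hin
    rcases hin with ⟨i, hi, hs⟩
    exact ⟨i, by simpa using hi, List.any_eq_true.mpr ⟨m, hm, hs⟩⟩

theorem source_priority_eq (source : String) :
    source_priority source = source_priority_alt source := by
  simp only [source_priority, source_priority_alt, spFold3]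
  unfold spQ
  rw [any_isIn_eq highMarkers (by decide), any_isIn_eq midMarkers (by decide),
      any_isIn_eq lowMarkers (by decide)]

-- ===== VERDICT (by name: the statement is the Claim_ definition above) =====
theorem source_priority_spec : Claim_equal_source_priority := by
  intro source _
  exact source_priority_eq source
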